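-- pv_equiv track=rewrite | github.com/NicoEve/graph-and-tree-algorithms | Tarea2/weights.py | emparejar
-- ===== SOURCE A (Python) =====
-- def emparejar(weights1, pesoMaximo):
--     posiblesParejas = []
--     ans = True
--     for i in range(len(weights1)):
--         if weights1[i] > pesoMaximo:
--             posiblesParejas.append(weights1[i])
--     for i in range(0, len(posiblesParejas), 2):
--         if i + 1 >= len(posiblesParejas) or posiblesParejas[i] != posiblesParejas[i + 1]:
--             ans = False
--     return ans
-- ===== SOURCE B (Python) =====
-- def _paired(l):
--     # consume the list two elements at a time
--     if not l:
--         return True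
--     if len(l) == 1:
--         return False
--     return l[0] == l[1] and _paired(l[2:])
--
--
-- def emparejar(weights1, pesoMaximo):
--     filtered = [w for w in weights1 if w > pesoMaximo]
--     return _paired(filtered)
-- ===== Notes on version B (the rewrite author's own statement) =====
-- stated objective: simpler
-- what changed: A builds the filtered list with an index loop and then scans index pairs with a mutable flag over range(0,len,2); B filters with a comprehension and checks the pairing by structural recursion consuming two elements at a time.
import Mathlib
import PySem

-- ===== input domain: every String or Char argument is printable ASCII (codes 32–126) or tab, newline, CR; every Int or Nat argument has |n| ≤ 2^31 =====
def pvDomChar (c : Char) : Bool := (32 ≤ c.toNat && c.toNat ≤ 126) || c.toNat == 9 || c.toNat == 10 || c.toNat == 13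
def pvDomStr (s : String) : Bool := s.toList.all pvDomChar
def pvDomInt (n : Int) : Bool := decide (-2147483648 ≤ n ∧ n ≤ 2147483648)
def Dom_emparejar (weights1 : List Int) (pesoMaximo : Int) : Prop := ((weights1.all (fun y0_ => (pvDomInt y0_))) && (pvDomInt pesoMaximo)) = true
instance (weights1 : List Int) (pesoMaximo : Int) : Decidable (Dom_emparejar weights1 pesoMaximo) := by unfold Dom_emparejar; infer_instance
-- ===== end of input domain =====

-- B replaces A's two index loops (filter loop + strided pair loop with a flag) by a
-- comprehension-style filter and a structural recursion consuming two elements at a time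
-- (objective: simpler).

-- ===== PORT A =====
def emparejar (weights1 : List Int) (pesoMaximo : Int) : Bool :=
  let posiblesParejas : List Int :=
    (PySem.List.pyRange 0 (weights1.length : Int)).foldl
      (fun acc i =>
        if PySem.List.pyGetD weights1 i 0 > pesoMaximo then
          acc ++ [PySem.List.pyGetD weights1 i 0]
        else acc) []
  (PySem.List.pyRange 0 (posiblesParejas.length : Int) 2).foldl
    (fun ans i =>
      if i + 1 ≥ (posiblesParejas.length : Int) ∨
          PySem.List.pyGetD posiblesParejas i 0 ≠ PySem.List.pyGetD posiblesParejas (i + 1) 0 then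
        false
      else ans) true

-- ===== PORT B =====
def paired : List Int → Bool
  | [] => true
  | [_] => false
  | a :: b :: rest => a == b && paired rest

def emparejar_alt (weights1 : List Int) (pesoMaximo : Int) : Bool :=
  paired (weights1.filter (fun w => w > pesoMaximo))

-- ===== PRECONDITION & SPEC =====
def Spec_emparejar (weights1 : List Int) (pesoMaximo : Int) (out : Bool) : Prop := out = emparejar_alt weights1 pesoMaximo
instance (weights1 : List Int) (pesoMaximo : Int) (out : Bool) : Decidable (Spec_emparejar weights1 pesoMaximo out) := by unfold Spec_emparejar; infer_instance

-- ===== CLAIM (what is proved, stated in full; the proofs are below) =====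
def Claim_equal_emparejar : Prop := ∀ (weights1 : List Int) (pesoMaximo : Int), Dom_emparejar weights1 pesoMaximo → Spec_emparejar weights1 pesoMaximo (emparejar weights1 pesoMaximo)

-- ===== LEMMAS AND PROOFS =====

/-- the pair-check at index 2k of A's second loop, on Nat indices -/
def chk (l : List Int) (k : Nat) : Bool :=
  decide (2 * k + 1 ≥ l.length) || (l.getD (2 * k) 0 != l.getD (2 * k + 1) 0)

theorem filter_fold (p : Int) : ∀ (l : List Int) (acc : List Int),
    l.foldl (fun acc v => if v > p then acc ++ [v] else acc) acc
      = acc ++ l.filter (fun w => w > p)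
  | [], acc => by simp
  | v :: l, acc => by
    by_cases h : v > p
    · simp [List.foldl_cons, h, filter_fold p l (acc ++ [v])]
    · simp [List.foldl_cons, h, filter_fold p l acc]

theorem foldl_flag {α : Type} (c : α → Bool) : ∀ (r : List α) (acc : Bool),
    r.foldl (fun ans x => if c x then false else ans) acc
      = (acc && r.foldl (fun ans x => if c x then false else ans) true)
  | [], acc => by simp
  | x :: r, acc => by
    rw [List.foldl_cons, List.foldl_cons]
    cases h : c x
    · rw [if_neg (by simp), if_neg (by simp)]
      exact foldl_flag c r acc
    · rw [if_pos (by simp), if_pos (by simp), foldl_flag c r false]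
      simp

theorem chk_shift (a b : Int) (rest : List Int) (k : Nat) :
    chk (a :: b :: rest) (k + 1) = chk rest k := by
  unfold chk
  have hd : decide (2 * (k + 1) + 1 ≥ (a :: b :: rest).length)
      = decide (2 * k + 1 ≥ rest.length) := by
    apply decide_eq_decide.mpr; simp [List.length_cons]; omega
  have g1 : (a :: b :: rest).getD (2 * (k + 1)) 0 = rest.getD (2 * k) 0 := by
    have h2 : 2 * (k + 1) = 2 * k + 1 + 1 := by omega
    simp [List.getD, h2]
  have g2 : (a :: b :: rest).getD (2 * (k + 1) + 1) 0 = rest.getD (2 * k + 1) 0 := by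
    have h2 : 2 * (k + 1) + 1 = 2 * k + 1 + 1 + 1 := by omega
    simp [List.getD, h2]
  rw [hd, g1, g2]

theorem loopNat : ∀ l : List Int,
    (List.range ((l.length + 1) / 2)).foldl (fun ans k => if chk l k then false else ans) true
      = paired l
  | [] => by simp [paired]
  | [a] => by simp [paired, chk]
  | a :: b :: rest => by
    have hc : ((a :: b :: rest).length + 1) / 2 = (rest.length + 1) / 2 + 1 := by
      simp [List.length_cons]; omega
    rw [hc, List.range_succ_eq_map, List.foldl_cons, List.foldl_map]
    have h0 : chk (a :: b :: rest) 0 = (a != b) := by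
      unfold chk
      have hl : decide (2 * 0 + 1 ≥ (a :: b :: rest).length) = false := by
        simp [List.length_cons]
      rw [hl]
      simp [List.getD]
    have hbody : (fun (x : Bool) (y : Nat) => if chk (a :: b :: rest) (Nat.succ y) then false else x)
        = fun x y => if chk rest y then false else x := by
      funext x y; rw [Nat.succ_eq_add_one, chk_shift]
    rw [h0, hbody, foldl_flag, loopNat rest]
    by_cases h : a = b <;> simp [paired, h]

theorem count_eq (n : Nat) :
    (if (0 : Int) < (n : Int) then (((n : Int) - 0 + 2 - 1) / 2).toNat else 0) = (n + 1) / 2 := by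
  split_ifs with h
  · have : ((n : Int) - 0 + 2 - 1) = ((n + 1 : Nat) : Int) := by push_cast; ring
    rw [this]
    rw [show ((2 : Int)) = ((2 : Nat) : Int) from rfl, ← Int.natCast_ediv, Int.toNat_natCast]
  · omega

theorem body_eq (l : List Int) :
    (fun (ans : Bool) (k : Nat) =>
        if (0 + 2 * (k : Int)) + 1 ≥ (l.length : Int) ∨
            PySem.List.pyGetD l (0 + 2 * (k : Int)) 0 ≠ PySem.List.pyGetD l ((0 + 2 * (k : Int)) + 1) 0
        then false else ans)
      = (fun ans k => if chk l k then false else ans) := by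
  funext ans k
  have e1 : (0 + 2 * (k : Int)) = ((2 * k : Nat) : Int) := by push_cast; ring
  have e2 : (0 + 2 * (k : Int)) + 1 = ((2 * k + 1 : Nat) : Int) := by push_cast; ring
  have h1 : PySem.List.pyGetD l (0 + 2 * (k : Int)) 0 = l.getD (2 * k) 0 := by
    rw [e1, PySem.List.pyGetD_natCast]
  have h2 : PySem.List.pyGetD l ((0 + 2 * (k : Int)) + 1) 0 = l.getD (2 * k + 1) 0 := by
    rw [e2, PySem.List.pyGetD_natCast]
  have h3 : ((0 + 2 * (k : Int)) + 1 ≥ (l.length : Int)) ↔ (2 * k + 1 ≥ l.length) := by omega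
  rw [h1, h2]
  unfold chk
  have h4 : decide ((l.length : Int) ≤ 2 * (k : Int) + 1) = decide (l.length ≤ 2 * k + 1) := by
    apply decide_eq_decide.mpr; omega
  simp [List.getD]
  rw [h4]

theorem loop2_eq (l : List Int) :
    (PySem.List.pyRange 0 (l.length : Int) 2).foldl
      (fun ans i =>
        if i + 1 ≥ (l.length : Int) ∨
            PySem.List.pyGetD l i 0 ≠ PySem.List.pyGetD l (i + 1) 0 then
          false
        else ans) true = paired l := by
  rw [PySem.List.pyRange_of_pos 0 (l.length : Int) (by norm_num), List.foldl_map,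
      count_eq l.length, body_eq l, loopNat]

-- ===== VERDICT (by name: the statement is the Claim_ definition above) =====
theorem emparejar_spec : Claim_equal_emparejar := by
  intro weights1 pesoMaximo _
  unfold Spec_emparejar emparejar emparejar_alt
  rw [PySem.List.foldl_pyRange_zero_pyGetD' weights1 0
        (fun acc v => if v > pesoMaximo then acc ++ [v] else acc) [],
      filter_fold pesoMaximo weights1 []]
  simp only [List.nil_append]
  exact loop2_eq (weights1.filter (fun w => w > pesoMaximo))
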